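-- pv_equiv track=rewrite | github.com/jihadichan/jihadichan.github.io | reader/scripts/translate_stories.py | split_stories
-- ===== SOURCE A (Python) =====
-- from typing import Any, Iterable, List, Optional, Sequence, Tuple, Union
--
-- def split_stories(raw: str) -> List[str]:
--     """Split the input file into stories separated by lines that are exactly '---'.
--
--     - Keeps story order.
--     - Trims leading/trailing blank lines in each story.
--     - Ignores empty segments.
--     """
--     parts: List[str] = []
--     current: List[str] = []
--     lines = raw.splitlines()
--     for line in lines:
--         if line.strip() == "---":
--             if current:
--                 story = "\n".join(current).strip()
--                 if story:
--                     parts.append(story)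
--                 current = []
--         else:
--             current.append(line)
--     # tail
--     if current:
--         story = "\n".join(current).strip()
--         if story:
--             parts.append(story)
--     return parts
-- ===== SOURCE B (Python) =====
-- from typing import List
--
-- def split_stories(raw: str) -> List[str]:
--     """Recursive split-at-first-separator re-implementation (no accumulator loop)."""
--     def go(lines: List[str]) -> List[str]:
--         for i, line in enumerate(lines):
--             if line.strip() == "---":
--                 story = "\n".join(lines[:i]).strip()
--                 rest = go(lines[i + 1:])
--                 return ([story] + rest) if story else rest
--         story = "\n".join(lines).strip()
--         return [story] if story else []
--     return go(raw.splitlines())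
-- ===== Notes on version B (the rewrite author's own statement) =====
-- stated objective: alternative
-- what changed: Replaced the single mutating accumulate-and-flush loop (current buffer plus tail flush) by a recursion that finds the first separator line, emits the segment before it, and recurses on the lines after it.
import Mathlib
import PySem

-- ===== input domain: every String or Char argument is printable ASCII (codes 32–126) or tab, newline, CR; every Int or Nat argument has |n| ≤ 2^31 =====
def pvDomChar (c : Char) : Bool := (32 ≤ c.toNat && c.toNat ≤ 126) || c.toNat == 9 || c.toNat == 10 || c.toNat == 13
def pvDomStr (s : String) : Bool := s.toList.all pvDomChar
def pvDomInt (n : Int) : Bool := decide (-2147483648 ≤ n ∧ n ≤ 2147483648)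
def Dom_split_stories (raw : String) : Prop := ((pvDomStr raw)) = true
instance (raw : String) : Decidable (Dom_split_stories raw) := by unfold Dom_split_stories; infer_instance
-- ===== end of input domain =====

-- B replaces A's accumulate-and-flush loop by a split-at-first-separator recursion; return values proved equal.

-- ===== PORT A =====
-- one loop step of A: state = (parts, current)
def pvStepA (st : List String × List String) (line : String) : List String × List String :=
  if PySem.Str.strip line = "---" then
    if st.2.isEmpty then (st.1, [])
    else
      let story := PySem.Str.strip (PySem.Str.join "\n" st.2)
      (if story = "" then st.1 else st.1 ++ [story], [])
  else (st.1, st.2 ++ [line])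

def split_stories (raw : String) : List String :=
  let lines := PySem.Str.splitlines raw
  let st := lines.foldl pvStepA ([], [])
  -- tail
  if st.2.isEmpty then st.1
  else
    let story := PySem.Str.strip (PySem.Str.join "\n" st.2)
    if story = "" then st.1 else st.1 ++ [story]

-- ===== PORT B =====
def pvGoB (lines : List String) : List String :=
  match h : lines.findIdx? (fun l => PySem.Str.strip l = "---") with
  | some i =>
      let story := PySem.Str.strip (PySem.Str.join "\n" (lines.take i))
      let rest := pvGoB (lines.drop (i + 1))
      if story = "" then rest else story :: rest
  | none =>
      let story := PySem.Str.strip (PySem.Str.join "\n" lines)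
      if story = "" then [] else [story]
termination_by lines.length
decreasing_by
  have hi := List.findIdx?_eq_some_iff_findIdx_eq.mp h
  simp [List.length_drop]
  omega

def split_stories_alt (raw : String) : List String :=
  pvGoB (PySem.Str.splitlines raw)

-- ===== PRECONDITION & SPEC =====
def Spec_split_stories (raw : String) (out : List String) : Prop := out = split_stories_alt raw
instance (raw : String) (out : List String) : Decidable (Spec_split_stories raw out) := by unfold Spec_split_stories; infer_instance

-- ===== CLAIM (what is proved, stated in full; the proofs are below) =====
def Claim_equal_split_stories : Prop := ∀ (raw : String), Dom_split_stories raw → Spec_split_stories raw (split_stories raw)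

-- ===== LEMMAS AND PROOFS =====

-- A's tail flush
def pvFinishA (st : List String × List String) : List String :=
  if st.2.isEmpty then st.1
  else
    let story := PySem.Str.strip (PySem.Str.join "\n" st.2)
    if story = "" then st.1 else st.1 ++ [story]

lemma pvGoB_nil_of_nosep (cur : List String)
    (hcur : ∀ l ∈ cur, ¬ PySem.Str.strip l = "---") :
    pvGoB cur =
      (if PySem.Str.strip (PySem.Str.join "\n" cur) = "" then []
       else [PySem.Str.strip (PySem.Str.join "\n" cur)]) := by
  have hnone : cur.findIdx? (fun l => PySem.Str.strip l = "---") = none := by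
    rw [List.findIdx?_eq_none_iff]
    intro x hx
    simp [hcur x hx]
  rw [pvGoB]
  split
  · simp_all
  · rfl

lemma pvFindIdx_append (cur : List String) (line : String) (ls : List String)
    (hcur : ∀ l ∈ cur, ¬ PySem.Str.strip l = "---")
    (hline : PySem.Str.strip line = "---") :
    (cur ++ line :: ls).findIdx? (fun l => PySem.Str.strip l = "---") = some cur.length := by
  induction cur with
  | nil => simp [List.findIdx?_cons, hline]
  | cons c cs ih =>
      have hc : ¬ PySem.Str.strip c = "---" := hcur c (by simp)
      have ih' := ih (fun l hl => hcur l (by simp [hl]))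
      simp [List.findIdx?_cons, hc, ih']

lemma pvLoop (lines : List String) (parts cur : List String)
    (hcur : ∀ l ∈ cur, ¬ PySem.Str.strip l = "---") :
    pvFinishA (lines.foldl pvStepA (parts, cur)) = parts ++ pvGoB (cur ++ lines) := by
  induction lines generalizing parts cur with
  | nil =>
      rw [List.append_nil, pvGoB_nil_of_nosep cur hcur]
      cases cur with
      | nil =>
          have : PySem.Str.strip (PySem.Str.join "\n" ([] : List String)) = "" := by decide
          simp [pvFinishA, this]
      | cons c cs =>
          simp only [pvFinishA, List.foldl_nil, List.isEmpty_cons]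
          split_ifs <;> simp_all
  | cons line ls ih =>
      by_cases hline : PySem.Str.strip line = "---"
      · have hfind := pvFindIdx_append cur line ls hcur hline
        have hstep : pvStepA (parts, cur) line =
            ((if PySem.Str.strip (PySem.Str.join "\n" cur) = "" then parts
              else parts ++ [PySem.Str.strip (PySem.Str.join "\n" cur)]), []) := by
          cases cur with
          | nil =>
              have : PySem.Str.strip (PySem.Str.join "\n" ([] : List String)) = "" := by decide
              simp [pvStepA, hline, this]
          | cons c cs => simp [pvStepA, hline]
        rw [pvGoB]
        split
        · rename_i i hsome
          rw [hfind] at hsome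
          obtain rfl : cur.length = i := Option.some.inj hsome
          have htake : (cur ++ line :: ls).take cur.length = cur := by
            simp
          have hdrop : (cur ++ line :: ls).drop (cur.length + 1) = ls := by
            rw [show cur.length + 1 = (cur ++ [line]).length by simp,
                show cur ++ line :: ls = (cur ++ [line]) ++ ls by simp]
            simp
          rw [htake, hdrop, List.foldl_cons, hstep,
              ih _ [] (by intro l hl; simp at hl)]
          simp only [List.nil_append]
          split_ifs <;> simp
        · rename_i hnone2
          rw [hfind] at hnone2
          cases hnone2
      · have hcur2 : ∀ l ∈ cur ++ [line], ¬ PySem.Str.strip l = "---" := by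
          intro l hl
          rcases List.mem_append.mp hl with h | h
          · exact hcur l h
          · simp at h; subst h; exact hline
        have hstep : pvStepA (parts, cur) line = (parts, cur ++ [line]) := by
          simp [pvStepA, hline]
        rw [List.foldl_cons, hstep, ih _ _ hcur2]
        simp

-- ===== VERDICT (by name: the statement is the Claim_ definition above) =====
theorem split_stories_spec : Claim_equal_split_stories := by
  intro raw _
  show split_stories raw = split_stories_alt raw
  unfold split_stories split_stories_alt
  have := pvLoop (PySem.Str.splitlines raw) [] [] (by intro l hl; simp at hl)
  simpa [pvFinishA] using this
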